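-- pv_equiv track=rewrite | github.com/Campus-Division-Smart-Technology-Team/AskAlfred | csv_alias_helper.py | find_missing_aliases
-- ===== SOURCE A (Python) =====
-- from typing import List, Dict, Set, Tuple
--
-- def find_missing_aliases(
--     extracted_names: List[Tuple[str, str]],
--     alias_to_canonical: Dict[str, str],
--     all_aliases: Set[str]
-- ) -> Dict[str, List[str]]:
--     """
--     Find extracted building names that are missing from CSV aliases.
--
--     Returns:
--         Dict mapping extracted names to list of files using that name
--     """
--     missing = {}
--
--     for filename, extracted in extracted_names:
--         extracted_lower = extracted.lower()
--
--         # Check if this extracted name is in aliases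
--         if extracted_lower not in all_aliases:
--             if extracted not in missing:
--                 missing[extracted] = []
--             missing[extracted].append(filename)
--
--     return missing
-- ===== SOURCE B (Python) =====
-- def find_missing_aliases(extracted_names, alias_to_canonical, all_aliases):
--     # filter once, then group: ordered distinct keys + per-key scan
--     pairs = [(e, f) for f, e in extracted_names if e.lower() not in all_aliases]
--     keys = list(dict.fromkeys(e for e, _ in pairs))
--     return {k: [f for e, f in pairs if e == k] for k in keys}
-- ===== Notes on version B (the rewrite author's own statement) =====
-- stated objective: alternative
-- what changed: Replaces A's single-pass mutable-dict grouping (conditional key creation plus in-place append) by a filter-once pipeline: build the filtered (extracted, filename) pair list, take its first-occurrence-distinct keys, and assemble each key's filename list with a per-key scan of the filtered pairs.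
import Mathlib
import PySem

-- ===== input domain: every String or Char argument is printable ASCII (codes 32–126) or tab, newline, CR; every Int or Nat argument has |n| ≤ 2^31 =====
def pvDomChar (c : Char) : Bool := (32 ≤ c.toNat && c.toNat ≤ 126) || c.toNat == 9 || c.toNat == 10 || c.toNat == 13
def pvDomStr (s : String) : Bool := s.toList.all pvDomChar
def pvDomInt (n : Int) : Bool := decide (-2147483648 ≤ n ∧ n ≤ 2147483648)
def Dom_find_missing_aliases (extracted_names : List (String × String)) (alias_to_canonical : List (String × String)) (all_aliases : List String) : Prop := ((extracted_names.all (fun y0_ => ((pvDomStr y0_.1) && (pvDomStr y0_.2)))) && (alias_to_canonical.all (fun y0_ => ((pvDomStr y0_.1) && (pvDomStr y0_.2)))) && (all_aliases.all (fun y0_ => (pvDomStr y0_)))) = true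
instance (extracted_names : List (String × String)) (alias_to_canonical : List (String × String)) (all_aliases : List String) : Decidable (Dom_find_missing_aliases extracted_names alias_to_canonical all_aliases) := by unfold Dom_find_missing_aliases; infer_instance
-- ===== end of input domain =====

-- B replaces A's single-pass mutable-dict grouping by a filter-once / distinct-keys / per-key-scan pipeline (alternative decomposition, not faster).

-- ===== PORT A =====
-- loop body of A: skip if the lowered name is an alias; else create the key if absent, then append the filename
def fmaStepA (all_aliases : List String) (missing : PySem.Dict String (List String)) (p : String × String) : PySem.Dict String (List String) :=
  let extracted_lower := PySem.Str.lower p.2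
  if all_aliases.contains extracted_lower then missing
  else
    let missing := if missing.contains p.2 then missing else missing.insert p.2 []
    missing.modify p.2 [] (fun l => l ++ [p.1])

def find_missing_aliases (extracted_names : List (String × String)) (alias_to_canonical : List (String × String)) (all_aliases : List String) : List (String × List String) :=
  (extracted_names.foldl (fmaStepA all_aliases) PySem.Dict.empty).items

-- ===== PORT B =====
def find_missing_aliases_alt (extracted_names : List (String × String)) (alias_to_canonical : List (String × String)) (all_aliases : List String) : List (String × List String) :=
  let pairs := (extracted_names.filter (fun p => !(all_aliases.contains (PySem.Str.lower p.2)))).map (fun p => (p.2, p.1))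
  let keys := PySem.Set.ofList (pairs.map Prod.fst)
  keys.map (fun k => (k, (pairs.filter (fun q => q.1 == k)).map (·.2)))

-- ===== PRECONDITION & SPEC =====
def Spec_find_missing_aliases (extracted_names : List (String × String)) (alias_to_canonical : List (String × String)) (all_aliases : List String) (out : List (String × List String)) : Prop := out = find_missing_aliases_alt extracted_names alias_to_canonical all_aliases
instance (extracted_names : List (String × String)) (alias_to_canonical : List (String × String)) (all_aliases : List String) (out : List (String × List String)) : Decidable (Spec_find_missing_aliases extracted_names alias_to_canonical all_aliases out) := by unfold Spec_find_missing_aliases; infer_instance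

-- ===== CLAIM (what is proved, stated in full; the proofs are below) =====
def Claim_equal_find_missing_aliases : Prop := ∀ (extracted_names : List (String × String)) (alias_to_canonical : List (String × String)) (all_aliases : List String), Dom_find_missing_aliases extracted_names alias_to_canonical all_aliases → Spec_find_missing_aliases extracted_names alias_to_canonical all_aliases (find_missing_aliases extracted_names alias_to_canonical all_aliases)

-- ===== LEMMAS AND PROOFS =====

-- A's conditional key-creation followed by an append is one `modify` with default []
theorem fmaStep_eq_modify (d : PySem.Dict String (List String)) (k f : String) :
    (let d' := if d.contains k then d else d.insert k []
     d'.modify k [] (fun l => l ++ [f])) = d.modify k [] (fun l => l ++ [f]) := by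
  by_cases h : d.contains k
  · simp [h]
  · have h' : d.contains k = false := by simpa using h
    simp only [h', if_false, Bool.false_eq_true]
    simp [PySem.Dict.modify, PySem.Dict.insert_insert_self, PySem.Dict.getD_insert_self,
      PySem.Dict.getD_of_not_contains (h := h')]
theorem fma_fold_eq (all_aliases : List String) (extracted_names : List (String × String)) :
    extracted_names.foldl (fmaStepA all_aliases) PySem.Dict.empty
      = ((extracted_names.filter (fun p => !(all_aliases.contains (PySem.Str.lower p.2)))).map (fun p => (p.2, p.1))).foldl
          (fun d q => d.modify q.1 [] (fun l => l ++ [q.2])) PySem.Dict.empty := by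
  rw [List.foldl_map]
  rw [show (fun (d : PySem.Dict String (List String)) (p : String × String) => d.modify (p.2, p.1).1 [] (fun l => l ++ [(p.2, p.1).2]))
        = fun d p => d.modify p.2 [] (fun l => l ++ [p.1]) from rfl]
  rw [← PySem.List.foldl_if_eq_foldl_filter]
  apply PySem.List.foldl_congr_mem
  intro d p _
  show fmaStepA all_aliases d p = _
  unfold fmaStepA
  by_cases hm : PySem.Str.lower p.2 ∈ all_aliases
  · simp [hm]
  · simp only [List.contains_eq_mem, decide_eq_true_eq, hm, if_false]
    exact fmaStep_eq_modify d p.2 p.1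

-- ===== VERDICT (by name: the statement is the Claim_ definition above) =====
theorem find_missing_aliases_spec : Claim_equal_find_missing_aliases := by
  intro en atc aa _
  unfold Spec_find_missing_aliases find_missing_aliases find_missing_aliases_alt
  dsimp only
  rw [fma_fold_eq]
  have hnd : (((en.filter (fun p => !(aa.contains (PySem.Str.lower p.2)))).map (fun p => (p.2, p.1))).foldl
      (fun d q => d.modify q.1 [] (fun l => l ++ [q.2])) PySem.Dict.empty).keys.Nodup :=
    PySem.Dict.nodup_keys_foldl_modify_key _ _ _ _ _ PySem.Dict.nodup_keys_empty
  rw [PySem.Dict.items_eq_map_keys _ hnd []]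
  rw [PySem.Dict.keys_foldl_modify_key]
  have hkeys : PySem.Set.update (PySem.Dict.empty : PySem.Dict String (List String)).keys
      (((en.filter (fun p => !(aa.contains (PySem.Str.lower p.2)))).map (fun p => (p.2, p.1))).map Prod.fst)
      = PySem.Set.ofList (((en.filter (fun p => !(aa.contains (PySem.Str.lower p.2)))).map (fun p => (p.2, p.1))).map Prod.fst) := rfl
  rw [hkeys]
  refine List.map_congr_left fun k _ => ?_
  rw [PySem.Dict.getD_foldl_modify_append]
  simp [PySem.Dict.getD_empty]
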